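-- pv_equiv track=rewrite | github.com/dangpnh2/graph_layout | model.py | get_level_nodes
-- ===== SOURCE A (Python) =====
-- from collections import defaultdict
--
-- def get_level_nodes(tree_depth):
--     level_nodes = defaultdict(list)
--     for level in range(3):
--         for key, value in tree_depth.items():
--             if value == level+1:
--                 level_nodes[level].append(key)
--     level_nodes = dict(level_nodes)
--     return level_nodes
-- ===== SOURCE B (Python) =====
-- def get_level_nodes(tree_depth):
--     buckets = ([], [], [])
--     for key, value in tree_depth.items():
--         if 1 <= value <= 3:
--             buckets[value - 1].append(key)
--     return {level: nodes for level, nodes in enumerate(buckets) if nodes}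
-- ===== Notes on version B (the rewrite author's own statement) =====
-- stated objective: simpler
-- what changed: Replaces the three full per-level dict scans building a defaultdict with one pass over the items into a fixed triple of plain list buckets, then a comprehension assembling the nonempty buckets in ascending level order.
import Mathlib
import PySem

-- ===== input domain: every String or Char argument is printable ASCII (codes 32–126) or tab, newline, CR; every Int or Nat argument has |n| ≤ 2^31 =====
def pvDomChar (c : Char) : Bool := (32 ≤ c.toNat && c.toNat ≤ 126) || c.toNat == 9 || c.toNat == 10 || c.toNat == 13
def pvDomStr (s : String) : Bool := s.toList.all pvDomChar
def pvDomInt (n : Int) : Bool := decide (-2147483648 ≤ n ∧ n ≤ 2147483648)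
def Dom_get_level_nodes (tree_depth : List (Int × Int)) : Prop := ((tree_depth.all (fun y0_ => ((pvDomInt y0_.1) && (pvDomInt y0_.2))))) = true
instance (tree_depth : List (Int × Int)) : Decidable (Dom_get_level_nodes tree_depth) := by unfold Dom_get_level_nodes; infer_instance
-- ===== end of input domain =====

-- B replaces A's three full scans into a defaultdict by one pass into a fixed triple of plain list buckets plus an assembly of the nonempty buckets in ascending level order (simpler; same cost).


-- ===== PORT A =====
-- level_nodes[level].append(key) on a defaultdict(list) is Dict.modify level [] (· ++ [key])
def get_level_nodes (tree_depth : List (Int × Int)) : List (Int × List Int) :=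
  let level_nodes : PySem.Dict Int (List Int) :=
    (PySem.List.pyRange 0 3 1).foldl (fun d level =>
      tree_depth.foldl (fun d kv =>
        if kv.2 == level + 1 then d.modify level [] (fun xs => xs ++ [kv.1]) else d) d)
      PySem.Dict.empty
  level_nodes.items

-- ===== PORT B =====
-- buckets[value - 1].append(key): tuple indexing with value ∈ {1,2,3} is ported as the branch on value (exact here)
def get_level_nodes_alt (tree_depth : List (Int × Int)) : List (Int × List Int) :=
  let buckets : List Int × List Int × List Int :=
    tree_depth.foldl (fun b kv =>
      if 1 ≤ kv.2 ∧ kv.2 ≤ 3 then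
        if kv.2 == 1 then (b.1 ++ [kv.1], b.2.1, b.2.2)
        else if kv.2 == 2 then (b.1, b.2.1 ++ [kv.1], b.2.2)
        else (b.1, b.2.1, b.2.2 ++ [kv.1])
      else b) ([], [], [])
  -- {level: nodes for level, nodes in enumerate(buckets) if nodes}
  (if buckets.1 = [] then [] else [((0 : Int), buckets.1)]) ++
  (if buckets.2.1 = [] then [] else [((1 : Int), buckets.2.1)]) ++
  (if buckets.2.2 = [] then [] else [((2 : Int), buckets.2.2)])

-- ===== PRECONDITION & SPEC =====
def Spec_get_level_nodes (tree_depth : List (Int × Int)) (out : List (Int × List Int)) : Prop := out = get_level_nodes_alt tree_depth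
instance (tree_depth : List (Int × Int)) (out : List (Int × List Int)) : Decidable (Spec_get_level_nodes tree_depth out) := by unfold Spec_get_level_nodes; infer_instance

-- ===== CLAIM (what is proved, stated in full; the proofs are below) =====
def Claim_equal_get_level_nodes : Prop := ∀ (tree_depth : List (Int × Int)), Dom_get_level_nodes tree_depth → Spec_get_level_nodes tree_depth (get_level_nodes tree_depth)

-- ===== LEMMAS AND PROOFS =====

-- keys whose depth is l+1, in list order
def pvBucket (l : Int) (td : List (Int × Int)) : List Int :=
  (td.filter (fun kv => kv.2 == l + 1)).map (fun kv => kv.1)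

-- the common normal form both programs compute: nonempty buckets for levels 0,1,2 ascending
def pvCanon (td : List (Int × Int)) : List (Int × List Int) :=
  (if pvBucket 0 td = [] then [] else [(0, pvBucket 0 td)]) ++
  ((if pvBucket 1 td = [] then [] else [(1, pvBucket 1 td)]) ++
   (if pvBucket 2 td = [] then [] else [(2, pvBucket 2 td)]))

lemma set_update_const_mem (s : PySem.Set Int) (xs : List (Int × Int)) (c : Int)
    (hc : c ∈ s) : PySem.Set.update s (xs.map (fun _ => c)) = s := by
  induction xs with
  | nil => rfl
  | cons x t ih => simpa [PySem.Set.update, PySem.Set.add, hc] using ih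

lemma set_update_const (s : PySem.Set Int) (xs : List (Int × Int)) (c : Int)
    (hc : c ∉ s) :
    PySem.Set.update s (xs.map (fun _ => c)) = if xs = [] then s else s ++ [c] := by
  cases xs with
  | nil => rfl
  | cons x t =>
      have h1 : PySem.Set.update s ((x :: t).map (fun _ => c))
          = PySem.Set.update (s ++ [c]) (t.map (fun _ => c)) := by
        simp [PySem.Set.update, PySem.Set.add, hc]
      rw [h1, set_update_const_mem]
      · simp
      · simp

lemma innerA_rw (td : List (Int × Int)) (l : Int) (d : PySem.Dict Int (List Int)) :
    td.foldl (fun d kv => if kv.2 == l + 1 then d.modify l [] (fun xs => xs ++ [kv.1]) else d) d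
      = ((td.filter (fun kv => kv.2 == l + 1)).map (fun kv => ((l, kv.1) : Int × Int))).foldl
          (fun d p => d.modify p.1 [] (fun xs => xs ++ [p.2])) d := by
  rw [PySem.List.foldl_if_eq_foldl_filter, List.foldl_map]

lemma innerA_keys (td : List (Int × Int)) (l : Int) (d : PySem.Dict Int (List Int))
    (hc : l ∉ d.keys) :
    (td.foldl (fun d kv => if kv.2 == l + 1 then d.modify l [] (fun xs => xs ++ [kv.1]) else d) d).keys
      = d.keys ++ (if pvBucket l td = [] then [] else [l]) := by
  rw [innerA_rw]
  have h1 : (List.foldl (fun d p => d.modify p.1 [] fun xs => xs ++ [p.2]) d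
        (List.map (fun kv => ((l, kv.1) : Int × Int)) (List.filter (fun kv => kv.2 == l + 1) td))).keys
      = PySem.Set.update d.keys ((List.map (fun kv => ((l, kv.1) : Int × Int)) (List.filter (fun kv => kv.2 == l + 1) td)).map (fun p => p.1)) :=
    PySem.Dict.keys_foldl_modify_key _ _ _ _ _
  rw [h1, List.map_map]
  have h2 : ((fun (p : Int × Int) => p.1) ∘ fun (kv : Int × Int) => ((l, kv.1) : Int × Int)) = fun _ => l := rfl
  rw [h2, set_update_const _ _ _ hc]
  have hb : (td.filter (fun kv => kv.2 == l + 1) = []) ↔ (pvBucket l td = []) := by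
    simp [pvBucket]
  by_cases h : td.filter (fun kv => kv.2 == l + 1) = []
  · simp [h, hb.mp h]
  · simp [h, hb.not.mp h]

lemma innerA_getD (td : List (Int × Int)) (l : Int) (d : PySem.Dict Int (List Int)) (c : Int) :
    (td.foldl (fun d kv => if kv.2 == l + 1 then d.modify l [] (fun xs => xs ++ [kv.1]) else d) d).getD c []
      = d.getD c [] ++ (if l = c then pvBucket l td else []) := by
  rw [innerA_rw, PySem.Dict.getD_foldl_modify_append]
  congr 1
  by_cases h : l = c
  · subst h
    simp [List.filter_map, Function.comp, pvBucket, List.map_map]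
  · simp [List.filter_map, Function.comp, h]

lemma innerA_items (td : List (Int × Int)) (l : Int) (d : PySem.Dict Int (List Int))
    (hnd : d.keys.Nodup) (hc : l ∉ d.keys) :
    (td.foldl (fun d kv => if kv.2 == l + 1 then d.modify l [] (fun xs => xs ++ [kv.1]) else d) d).items
      = d.items ++ (if pvBucket l td = [] then [] else [(l, pvBucket l td)]) := by
  have hk := innerA_keys td l d hc
  have hndR : (td.foldl (fun d kv => if kv.2 == l + 1 then d.modify l [] (fun xs => xs ++ [kv.1]) else d) d).keys.Nodup := by
    rw [hk]
    by_cases h : pvBucket l td = []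
    · simpa [h]
    · simp only [h, if_false]
      exact List.Nodup.append hnd (List.nodup_singleton l)
        (by simpa [List.disjoint_singleton] using hc)
  have hitems := PySem.Dict.items_eq_map_keys _ hndR ([] : List Int)
  rw [hitems, hk]
  by_cases h : pvBucket l td = []
  · simp only [h, if_true, List.append_nil]
    have : ∀ k ∈ d.keys, ((k : Int), (td.foldl (fun d kv => if kv.2 == l + 1 then d.modify l [] (fun xs => xs ++ [kv.1]) else d) d).getD k []) = (k, d.getD k []) := by
      intro k hkmem
      rw [innerA_getD]
      by_cases hlk : l = k
      · subst hlk; simp [h]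
      · simp [hlk]
    rw [List.map_congr_left this]
    exact (PySem.Dict.items_eq_map_keys d hnd ([] : List Int)).symm
  · simp only [h, if_false]
    rw [List.map_append]
    congr 1
    · have : ∀ k ∈ d.keys, ((k : Int), (td.foldl (fun d kv => if kv.2 == l + 1 then d.modify l [] (fun xs => xs ++ [kv.1]) else d) d).getD k []) = (k, d.getD k []) := by
        intro k hkmem
        rw [innerA_getD]
        have : l ≠ k := fun he => hc (he ▸ hkmem)
        simp [this]
      rw [List.map_congr_left this]
      exact (PySem.Dict.items_eq_map_keys d hnd ([] : List Int)).symm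
    · simp only [List.map_cons, List.map_nil]
      rw [innerA_getD]
      have hg : d.getD l [] = [] := by
        apply PySem.Dict.getD_of_not_contains
        rw [← Bool.not_eq_true, PySem.Dict.contains_iff_mem_keys]
        exact hc
      simp [hg]

lemma A_eq_canon (td : List (Int × Int)) : get_level_nodes td = pvCanon td := by
  have hR : PySem.List.pyRange 0 3 1 = [0, 1, 2] := by decide
  simp only [get_level_nodes, hR, List.foldl_cons, List.foldl_nil]
  set d0 : PySem.Dict Int (List Int) := td.foldl (fun d kv => if kv.2 == (0:Int) + 1 then d.modify (0:Int) [] (fun xs => xs ++ [kv.1]) else d) PySem.Dict.empty with hd0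
  set d1 : PySem.Dict Int (List Int) := td.foldl (fun d kv => if kv.2 == (1:Int) + 1 then d.modify (1:Int) [] (fun xs => xs ++ [kv.1]) else d) d0 with hd1
  have hk0 : d0.keys = if pvBucket 0 td = [] then [] else [0] := by
    rw [hd0, innerA_keys td 0 PySem.Dict.empty (by simp)]
    simp
  have hn0 : d0.keys.Nodup := by rw [hk0]; split <;> simp
  have hm0 : ∀ c : Int, c ≠ 0 → c ∉ d0.keys := by
    intro c hcne
    rw [hk0]; split <;> simp [hcne]
  have hi0 : d0.items = (if pvBucket 0 td = [] then [] else [(0, pvBucket 0 td)]) := by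
    rw [hd0, innerA_items td 0 PySem.Dict.empty (by simp) (by simp)]
    simp [PySem.Dict.empty]
  have hk1 : d1.keys = d0.keys ++ (if pvBucket 1 td = [] then [] else [1]) := by
    rw [hd1, innerA_keys td 1 d0 (hm0 1 (by norm_num))]
  have hn1 : d1.keys.Nodup := by
    rw [hk1, hk0]
    split <;> split <;> simp
  have hm1 : (2 : Int) ∉ d1.keys := by
    rw [hk1, hk0]
    split <;> split <;> simp
  have hi1 : d1.items = d0.items ++ (if pvBucket 1 td = [] then [] else [(1, pvBucket 1 td)]) := by
    rw [hd1, innerA_items td 1 d0 hn0 (hm0 1 (by norm_num))]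
  have hi2 := innerA_items td 2 d1 hn1 hm1
  rw [hi2, hi1, hi0]
  simp [pvCanon]

-- B's single pass accumulates exactly the three buckets
lemma pvBucket_cons (l k v : Int) (t : List (Int × Int)) :
    pvBucket l ((k, v) :: t) = (if v = l + 1 then [k] else []) ++ pvBucket l t := by
  by_cases h : v = l + 1 <;> simp [pvBucket, h]

lemma B_fold_inv (td : List (Int × Int)) :
    ∀ b : List Int × List Int × List Int,
    td.foldl (fun b kv =>
      if 1 ≤ kv.2 ∧ kv.2 ≤ 3 then
        if kv.2 == 1 then (b.1 ++ [kv.1], b.2.1, b.2.2)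
        else if kv.2 == 2 then (b.1, b.2.1 ++ [kv.1], b.2.2)
        else (b.1, b.2.1, b.2.2 ++ [kv.1])
      else b) b
      = (b.1 ++ pvBucket 0 td, b.2.1 ++ pvBucket 1 td, b.2.2 ++ pvBucket 2 td) := by
  induction td with
  | nil => intro b; simp [pvBucket]
  | cons kv t ih =>
      intro b
      obtain ⟨k, v⟩ := kv
      simp only [List.foldl_cons, pvBucket_cons]
      rw [ih]
      by_cases h1 : v = 1
      · subst h1; norm_num
      · by_cases h2 : v = 2
        · subst h2; norm_num
        · by_cases h3 : v = 3
          · subst h3; norm_num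
          · have hc : ¬ (1 ≤ v ∧ v ≤ 3) := by omega
            simp only [hc, if_false]
            simp only [Prod.mk.injEq]
            refine ⟨by simpa using h1, by simpa using h2, by simpa using h3⟩

lemma B_eq_canon (td : List (Int × Int)) : get_level_nodes_alt td = pvCanon td := by
  simp only [get_level_nodes_alt, B_fold_inv]
  simp [pvCanon, List.append_assoc]

-- ===== VERDICT (by name: the statement is the Claim_ definition above) =====
theorem get_level_nodes_spec : Claim_equal_get_level_nodes := by
  intro td _
  unfold Spec_get_level_nodes
  rw [A_eq_canon, B_eq_canon]
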